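-- pv_equiv track=rewrite | github.com/z3y50n/advent_of_code | 2023/day14/main.py | move_tiles
-- ===== SOURCE A (Python) =====
-- def move_tiles(tiles: list[str]):
--     new = tiles.copy()
--     last_barrier = -1
--     for i, tile in enumerate(tiles):
--         if tile == "#":
--             last_barrier = i
--         elif tile == "O":
--             new[i] = "."
--             new[last_barrier + 1] = "O"
--             last_barrier += 1
--     return new
-- ===== SOURCE B (Python) =====
-- def _roll(seg):
--     k = seg.count("O")
--     blanked = ["." if t == "O" else t for t in seg]
--     return ["O"] * k + blanked[k:]
--
-- def move_tiles(tiles: list[str]):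
--     out = []
--     seg = []
--     for t in tiles:
--         if t == "#":
--             out += _roll(seg)
--             out.append("#")
--             seg = []
--         else:
--             seg.append(t)
--     return out + _roll(seg)
-- ===== Notes on version B (the rewrite author's own statement) =====
-- stated objective: alternative
-- what changed: B splits the row into '#'-separated segments and rebuilds each one (k leading 'O's followed by the O-blanked remainder), instead of A's index bookkeeping that writes '.' and 'O' into a mutable copy via a last_barrier pointer.
import Mathlib
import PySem

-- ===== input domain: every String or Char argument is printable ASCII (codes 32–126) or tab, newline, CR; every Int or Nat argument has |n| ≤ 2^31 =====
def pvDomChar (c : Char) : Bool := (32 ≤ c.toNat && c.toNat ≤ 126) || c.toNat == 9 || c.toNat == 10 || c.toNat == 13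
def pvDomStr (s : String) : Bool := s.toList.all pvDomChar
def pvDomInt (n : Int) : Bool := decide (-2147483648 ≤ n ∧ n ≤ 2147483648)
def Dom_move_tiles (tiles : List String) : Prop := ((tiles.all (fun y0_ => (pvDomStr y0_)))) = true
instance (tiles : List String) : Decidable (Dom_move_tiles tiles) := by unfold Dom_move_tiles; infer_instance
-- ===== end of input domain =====

-- B rebuilds the row segment-by-segment between '#' barriers instead of A's last_barrier
-- index bookkeeping over a mutable copy; same cost, different decomposition (objective: alternative).

-- ===== PORT A =====
-- A: copy the list, then for each (i, tile): '#' records the barrier index; 'O' blanks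
-- position i and writes 'O' at last_barrier+1, then advances last_barrier.
def move_tiles (tiles : List String) : List String :=
  ((PySem.List.enumerate tiles 0).foldl
    (fun (st : List String × Int) p =>
      if p.2 = "#" then (st.1, p.1)
      else if p.2 = "O" then
        (PySem.List.pySetD (PySem.List.pySetD st.1 p.1 ".") (st.2 + 1) "O", st.2 + 1)
      else st)
    (tiles, -1)).1

-- ===== PORT B =====
-- B helper: rebuild one '#'-free segment: k = seg.count("O") leading "O"s, then the
-- O-blanked segment with its first k cells dropped.
def pvRollSeg (seg : List String) : List String :=
  let k := seg.count "O"
  let blanked := seg.map (fun t => if t = "O" then "." else t)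
  List.replicate k "O" ++ blanked.drop k

-- B: fold keeping (finished output, current segment); a '#' flushes the rolled segment.
def move_tiles_alt (tiles : List String) : List String :=
  let st := tiles.foldl
    (fun (st : List String × List String) t =>
      if t = "#" then (st.1 ++ pvRollSeg st.2 ++ ["#"], ([] : List String))
      else (st.1, st.2 ++ [t]))
    (([] : List String), ([] : List String))
  st.1 ++ pvRollSeg st.2

-- ===== PRECONDITION & SPEC =====
def Spec_move_tiles (tiles : List String) (out : List String) : Prop := out = move_tiles_alt tiles
instance (tiles : List String) (out : List String) : Decidable (Spec_move_tiles tiles out) := by unfold Spec_move_tiles; infer_instance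

-- ===== CLAIM (what is proved, stated in full; the proofs are below) =====
def Claim_equal_move_tiles : Prop := ∀ (tiles : List String), Dom_move_tiles tiles → Spec_move_tiles tiles (move_tiles tiles)

-- ===== LEMMAS AND PROOFS =====

-- the fold steps of the two ports, named for the proofs
def pvStepA (st : List String × Int) (p : Int × String) : List String × Int :=
  if p.2 = "#" then (st.1, p.1)
  else if p.2 = "O" then
    (PySem.List.pySetD (PySem.List.pySetD st.1 p.1 ".") (st.2 + 1) "O", st.2 + 1)
  else st

def pvStepB (st : List String × List String) (t : String) : List String × List String :=
  if t = "#" then (st.1 ++ pvRollSeg st.2 ++ ["#"], ([] : List String))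
  else (st.1, st.2 ++ [t])

theorem pvRollSeg_length (seg : List String) : (pvRollSeg seg).length = seg.length := by
  have h := List.count_le_length (a := "O") (l := seg)
  simp [pvRollSeg]
  omega

theorem pvRollSeg_nil : pvRollSeg [] = [] := rfl

theorem pvRollSeg_append_other (seg : List String) (t : String) (ht : t ≠ "O") :
    pvRollSeg (seg ++ [t]) = pvRollSeg seg ++ [t] := by
  have hk := List.count_le_length (a := "O") (l := seg)
  simp [pvRollSeg, List.count_append, ht,
    List.drop_append_of_le_length, List.length_map, hk]

theorem pvRollSeg_set_O (seg l' : List String) :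
    ((pvRollSeg seg ++ "O" :: l').set seg.length ".").set (seg.count "O") "O"
      = pvRollSeg (seg ++ ["O"]) ++ l' := by
  have hk := List.count_le_length (a := "O") (l := seg)
  set k := seg.count "O" with hkdef
  set b := seg.map (fun t => if t = "O" then "." else t) with hbdef
  have hb : b.length = seg.length := by simp [hbdef]
  have h1 : pvRollSeg seg = List.replicate k "O" ++ b.drop k := rfl
  have hlen : (pvRollSeg seg).length = seg.length := pvRollSeg_length seg
  -- first set hits the head "O" of the tail part
  have hset1 : (pvRollSeg seg ++ "O" :: l').set seg.length "."
      = pvRollSeg seg ++ "." :: l' := by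
    rw [List.set_append_right _ _ (by omega)]
    simp [hlen]
  rw [hset1, h1, List.append_assoc]
  rw [List.set_append_right _ _ (by simp)]
  have hrep : (List.replicate k "O").length = k := by simp
  rw [hrep]
  simp only [Nat.sub_self]
  have hroll : pvRollSeg (seg ++ ["O"])
      = List.replicate (k + 1) "O" ++ (b ++ ["."]).drop (k + 1) := by
    simp [pvRollSeg, List.count_append, hbdef, hkdef]
  rcases hdk : b.drop k with _ | ⟨h, tl⟩
  · -- k = seg.length : all tiles of the segment are "O"
    have hkb : b.length ≤ k := by
      by_contra hc
      have := List.drop_eq_nil_iff.mp hdk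
      omega
    have hkeq : k = seg.length := by omega
    rw [hroll]
    have : (b ++ ["."]).drop (k + 1) = [] := by
      apply List.drop_eq_nil_iff.mpr
      simp [hb, hkeq]
    rw [this]
    simp [List.replicate_succ' (n := k)]
  · -- k < seg.length
    have htl : (b ++ ["."]).drop (k + 1) = tl ++ ["."] := by
      have hlt : k + 1 ≤ b.length := by
        by_contra hc
        have : b.length ≤ k := by omega
        simp [List.drop_eq_nil_iff.mpr this] at hdk
      rw [List.drop_append_of_le_length hlt]
      have : b.drop (k + 1) = (b.drop k).drop 1 := by
        rw [List.drop_drop]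
      rw [this, hdk]
      simp
    rw [hroll, htl]
    simp [List.replicate_succ' (n := k)]

-- the invariant the two folds preserve
theorem pvMain (l : List String) : ∀ (out seg : List String),
    ((PySem.List.enumerate l ((out.length + seg.length : Nat) : Int)).foldl pvStepA
        (out ++ pvRollSeg seg ++ l, (out.length : Int) + (seg.count "O" : Int) - 1)).1
      = (l.foldl pvStepB (out, seg)).1 ++ pvRollSeg ((l.foldl pvStepB (out, seg)).2) := by
  induction l with
  | nil => intro out seg; simp [PySem.List.enumerate_nil]
  | cons t l' ih =>
    intro out seg
    rw [PySem.List.enumerate_cons, List.foldl_cons, List.foldl_cons]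
    by_cases h1 : t = "#"
    · -- barrier: flush the segment
      have hstepA : pvStepA (out ++ pvRollSeg seg ++ t :: l',
          (out.length : Int) + (seg.count "O" : Int) - 1)
          ((out.length + seg.length : Nat), t)
          = (out ++ pvRollSeg seg ++ t :: l', ((out.length + seg.length : Nat) : Int)) := by
        simp [pvStepA, h1]
      have hstepB : pvStepB (out, seg) t = (out ++ pvRollSeg seg ++ ["#"], []) := by
        simp [pvStepB, h1]
      rw [hstepA, hstepB]
      have heq : out ++ pvRollSeg seg ++ t :: l'
          = (out ++ pvRollSeg seg ++ ["#"]) ++ pvRollSeg [] ++ l' := by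
        simp [pvRollSeg_nil, h1]
      have hlen : (out ++ pvRollSeg seg ++ ["#"]).length = out.length + seg.length + 1 := by
        simp [pvRollSeg_length]
        omega
      have := ih (out ++ pvRollSeg seg ++ ["#"]) []
      rw [hlen] at this
      rw [heq]
      convert this using 3
      all_goals simp
    · by_cases h2 : t = "O"
      · -- a rolling tile
        have hk := List.count_le_length (a := "O") (l := seg)
        have hstepA : pvStepA (out ++ pvRollSeg seg ++ t :: l',
            (out.length : Int) + (seg.count "O" : Int) - 1)
            ((out.length + seg.length : Nat), t)
            = (out ++ pvRollSeg (seg ++ ["O"]) ++ l',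
               (out.length : Int) + (seg.count "O" : Int)) := by
          subst h2
          simp only [pvStepA, if_neg h1, if_true, Prod.mk.injEq]
          constructor
          · have harith : (out.length : Int) + (seg.count "O" : Int) - 1 + 1
                = ((out.length + seg.count "O" : Nat) : Int) := by push_cast; ring
            rw [harith, PySem.List.pySetD_natCast, PySem.List.pySetD_natCast]
            rw [List.append_assoc, List.set_append_right _ _ (by omega),
              List.set_append_right _ _ (by omega)]
            have e1 : out.length + seg.length - out.length = seg.length := by omega
            have e2 : out.length + seg.count "O" - out.length = seg.count "O" := by omega
            rw [e1, e2, pvRollSeg_set_O, List.append_assoc]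
          · omega
        have hstepB : pvStepB (out, seg) t = (out, seg ++ [t]) := by
          simp [pvStepB, h1]
        rw [hstepA, hstepB]
        have := ih out (seg ++ ["O"])
        subst h2
        have hcnt : (seg ++ ["O"]).count "O" = seg.count "O" + 1 := by
          simp [List.count_append]
        rw [hcnt] at this
        convert this using 3
        all_goals (congr 1; simp; omega)
      · -- inert tile
        have hstepA : pvStepA (out ++ pvRollSeg seg ++ t :: l',
            (out.length : Int) + (seg.count "O" : Int) - 1)
            ((out.length + seg.length : Nat), t)
            = (out ++ pvRollSeg seg ++ t :: l',
               (out.length : Int) + (seg.count "O" : Int) - 1) := by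
          simp [pvStepA, h1, h2]
        have hstepB : pvStepB (out, seg) t = (out, seg ++ [t]) := by
          simp [pvStepB, h1]
        rw [hstepA, hstepB]
        have heq : out ++ pvRollSeg seg ++ t :: l'
            = out ++ pvRollSeg (seg ++ [t]) ++ l' := by
          rw [pvRollSeg_append_other seg t h2]; simp
        have hcnt : (seg ++ [t]).count "O" = seg.count "O" := by
          simp [List.count_append, h2]
        have := ih out (seg ++ [t])
        rw [hcnt] at this
        rw [heq]
        convert this using 3
        all_goals (congr 1; simp; omega)

-- ===== VERDICT (by name: the statement is the Claim_ definition above) =====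
theorem move_tiles_spec : Claim_equal_move_tiles := by
  intro tiles _
  show move_tiles tiles = move_tiles_alt tiles
  have h := pvMain tiles [] []
  norm_num [pvRollSeg_nil] at h
  exact h
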